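-- pv_equiv track=rewrite | github.com/cirosantilli/project-euler-solvers | solvers/283.py | divisors_limited
-- ===== SOURCE A (Python) =====
-- def divisors_limited(factors, limit):
--     """
--     Generate all divisors <= limit of a number whose prime factorization is given.
--     """
--     divs = [1]
--     for p, e in factors:
--         new = []
--         for d in divs:
--             v = d
--             for _ in range(e + 1):
--                 if v > limit:
--                     break
--                 new.append(v)
--                 v *= p
--         divs = new
--     return divs
-- ===== SOURCE B (Python) =====
-- def divisors_limited(factors, limit):
--     """
--     Generate all divisors <= limit of a number whose prime factorization is given.
--     Depth-first recursion over the factor list: extend the partial product d by each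
--     power of the current prime while it stays <= limit, recursing on the later primes;
--     completed products are emitted at the leaves.
--     """
--     out = []
--     def go(k, d):
--         if k == len(factors):
--             out.append(d)
--             return
--         p, e = factors[k]
--         v, i = d, 0
--         while i <= e and v <= limit:
--             go(k + 1, v)
--             v *= p
--             i += 1
--     go(0, 1)
--     return out
-- ===== Notes on version B (the rewrite author's own statement) =====
-- stated objective: alternative
-- what changed: Replaces A's breadth-first rebuilding of the whole divisor list once per prime with a depth-first recursion over the factor list that emits finished products at the leaves, extending the partial product by successive prime powers while they stay within the limit.
import Mathlib
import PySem

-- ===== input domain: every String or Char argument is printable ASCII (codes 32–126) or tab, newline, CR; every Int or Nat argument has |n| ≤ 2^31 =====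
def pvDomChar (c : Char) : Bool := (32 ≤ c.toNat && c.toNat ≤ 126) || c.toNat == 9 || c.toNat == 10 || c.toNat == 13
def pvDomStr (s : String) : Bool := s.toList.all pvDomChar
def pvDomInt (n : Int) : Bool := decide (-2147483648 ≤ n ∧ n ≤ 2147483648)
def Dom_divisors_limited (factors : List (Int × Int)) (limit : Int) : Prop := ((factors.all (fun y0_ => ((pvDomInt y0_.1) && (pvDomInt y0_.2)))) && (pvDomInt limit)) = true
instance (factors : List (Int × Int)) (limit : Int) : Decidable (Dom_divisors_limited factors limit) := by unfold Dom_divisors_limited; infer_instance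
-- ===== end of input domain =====

-- B builds the divisor list by depth-first recursion over the factor list (emitting at the
-- leaves) instead of A's breadth-first per-prime rebuilding of the whole divisor list;
-- same values, same order.

-- ===== PORT A =====
-- inner loop 'for _ in range(e+1): if v > limit: break; new.append(v); v *= p';
-- fuel (e+1).toNat = the number of iterations of range(e+1)
def pvInnerA (limit p : Int) : Nat → Int → List Int
  | 0, _ => []
  | n + 1, v => if v > limit then [] else v :: pvInnerA limit p n (v * p)

def divisors_limited (factors : List (Int × Int)) (limit : Int) : List Int :=
  factors.foldl (fun divs pe => divs.flatMap (fun d => pvInnerA limit pe.1 (pe.2 + 1).toNat d)) [1]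

-- ===== PORT B =====
-- go(k, d) walks factors[k:]; we return the block of values go appends to out (in order).
-- pvLoopB is the 'while i <= e and v <= limit' loop, fuel (e+1).toNat bounds 'i <= e'.
mutual
def pvGoB (limit : Int) : List (Int × Int) → Int → List Int
  | [], d => [d]
  | (p, e) :: rest, d => pvLoopB limit p rest (e + 1).toNat d
  termination_by fs _ => (fs.length, 0)
def pvLoopB (limit p : Int) : List (Int × Int) → Nat → Int → List Int
  | _, 0, _ => []
  | rest, n + 1, v =>
      if v ≤ limit then pvGoB limit rest v ++ pvLoopB limit p rest n (v * p) else []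
  termination_by rest n _ => (rest.length, n + 1)
end

def divisors_limited_alt (factors : List (Int × Int)) (limit : Int) : List Int :=
  pvGoB limit factors 1

-- ===== PRECONDITION & SPEC =====
def Spec_divisors_limited (factors : List (Int × Int)) (limit : Int) (out : List Int) : Prop := out = divisors_limited_alt factors limit
instance (factors : List (Int × Int)) (limit : Int) (out : List Int) : Decidable (Spec_divisors_limited factors limit out) := by unfold Spec_divisors_limited; infer_instance

-- ===== CLAIM (what is proved, stated in full; the proofs are below) =====
def Claim_equal_divisors_limited : Prop := ∀ (factors : List (Int × Int)) (limit : Int), Dom_divisors_limited factors limit → Spec_divisors_limited factors limit (divisors_limited factors limit)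

-- ===== LEMMAS AND PROOFS =====

theorem pvGoB_nil (limit d : Int) : pvGoB limit [] d = [d] := by rw [pvGoB]

theorem pvGoB_cons (limit p e d : Int) (rest : List (Int × Int)) :
    pvGoB limit ((p, e) :: rest) d = pvLoopB limit p rest (e + 1).toNat d := by rw [pvGoB]

-- B's while-loop at one prime is A's inner break-loop with the recursion distributed over it
theorem loopB_eq_flatMap (limit p : Int) (rest : List (Int × Int)) (n : Nat) (v : Int) :
    pvLoopB limit p rest n v = (pvInnerA limit p n v).flatMap (pvGoB limit rest) := by
  induction n generalizing v with
  | zero => simp [pvLoopB, pvInnerA]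
  | succ n ih =>
    rw [pvLoopB, pvInnerA]
    by_cases h : v ≤ limit
    · rw [if_pos h, if_neg (by omega), List.flatMap_cons, ih (v * p)]
    · rw [if_neg h, if_pos (by omega), List.flatMap_nil]

-- BFS = DFS: folding A's per-prime expansion over any seed list equals flatMapping B's recursion
theorem foldl_eq_flatMap_goB (limit : Int) (fs : List (Int × Int)) (divs : List Int) :
    fs.foldl (fun divs pe => divs.flatMap (fun d => pvInnerA limit pe.1 (pe.2 + 1).toNat d)) divs
      = divs.flatMap (pvGoB limit fs) := by
  induction fs generalizing divs with
  | nil =>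
    have h : pvGoB limit [] = fun d => [d] := funext fun d => pvGoB_nil limit d
    simp [h]
  | cons pe fs ih =>
    obtain ⟨p, e⟩ := pe
    rw [List.foldl_cons, ih, List.flatMap_assoc]
    have h : pvGoB limit ((p, e) :: fs)
        = fun d => (pvInnerA limit p (e + 1).toNat d).flatMap (pvGoB limit fs) :=
      funext fun d => by rw [pvGoB_cons, loopB_eq_flatMap]
    rw [h]

-- ===== VERDICT (by name: the statement is the Claim_ definition above) =====
theorem divisors_limited_spec : Claim_equal_divisors_limited := by
  intro factors limit _
  unfold Spec_divisors_limited divisors_limited divisors_limited_alt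
  rw [foldl_eq_flatMap_goB]
  simp
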